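-- pv_equiv track=rewrite | github.com/ademiray1/Codewars | Array_manipulation.py | array_manip
-- ===== SOURCE A (Python) =====
-- def array_manip(array):
--
--     final_list = []
--
--     for i in range(len(array)):
--
--         min_list = []
--
--         for a in array[i+1:]:
--
--             if a > array[i]:
--                 min_list.append(a)
--         min_val = min(min_list, default = -1)
--
--         final_list.append(min_val)
--
--     return final_list
-- ===== SOURCE B (Python) =====
-- def array_manip(array):
--     # One right-to-left pass keeping a sorted list of the elements already seen
--     # (the suffix); a hand-written binary search (bisect_right) finds both the
--     # answer (smallest suffix element > x) and the insertion point in O(log n).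
--     res = []
--     s = []  # sorted ascending: the elements to the right of the current one
--     for x in reversed(array):
--         lo, hi = 0, len(s)
--         while lo < hi:
--             mid = (lo + hi) // 2
--             if s[mid] <= x:
--                 lo = mid + 1
--             else:
--                 hi = mid
--         res.append(s[lo] if lo < len(s) else -1)
--         s.insert(lo, x)
--     res.reverse()
--     return res
-- ===== Notes on version B (the rewrite author's own statement) =====
-- stated objective: faster
-- what changed: Replaced A's nested forward scans (for each index, scan the whole remaining suffix and take a min) by a single right-to-left pass that maintains the already-seen suffix as a sorted list and answers each query (smallest later element greater than the current one) with a hand-written binary search that also yields the insertion point.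
import Mathlib
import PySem

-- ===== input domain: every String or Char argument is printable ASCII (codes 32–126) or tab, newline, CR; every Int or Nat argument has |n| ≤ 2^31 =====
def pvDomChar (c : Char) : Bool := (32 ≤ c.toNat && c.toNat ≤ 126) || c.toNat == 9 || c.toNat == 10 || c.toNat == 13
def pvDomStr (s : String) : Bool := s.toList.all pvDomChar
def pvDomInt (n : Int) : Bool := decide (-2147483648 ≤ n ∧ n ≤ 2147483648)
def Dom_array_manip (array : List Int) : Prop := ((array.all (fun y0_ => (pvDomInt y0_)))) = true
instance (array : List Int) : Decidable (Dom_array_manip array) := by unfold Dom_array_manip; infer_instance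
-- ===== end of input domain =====

-- B replaces A's quadratic nested scans by one right-to-left pass over a sorted
-- list queried/updated with a hand-written binary search (objective: faster).


-- ===== PORT A =====
def array_manip (array : List Int) : List Int :=
  (PySem.List.pyRange 0 (array.length : Int) 1).foldl (fun final_list i =>
    let ai := PySem.List.pyGetD array i 0
    let min_list := (PySem.List.slice array (some (i + 1)) none).foldl
      (fun ml a => if a > ai then ml ++ [a] else ml) []
    let min_val := PySem.List.minD min_list (fun y => y) (-1)
    final_list ++ [min_val]) []

-- ===== PORT B =====
-- the hand-written bisect_right loop of Source B; lo and hi are nonnegative Python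
-- ints bounded by len(s), so Nat arithmetic ((lo+hi)/2 = (lo+hi)//2) is exact
def amBsearch (s : List Int) (x : Int) (lo hi : Nat) : Nat :=
  if _h : lo < hi then
    let mid := (lo + hi) / 2
    if s.getD mid 0 ≤ x then amBsearch s x (mid + 1) hi
    else amBsearch s x lo mid
  else lo
termination_by hi - lo
decreasing_by all_goals omega

-- one iteration of Source B's loop: state = (res, s)
def amStep (p : List Int × List Int) (x : Int) : List Int × List Int :=
  let s := p.2
  let lo := amBsearch s x 0 s.length
  let nxt := if lo < s.length then s.getD lo 0 else -1
  (p.1 ++ [nxt], PySem.List.insert s (lo : Int) x)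

def array_manip_alt (array : List Int) : List Int :=
  let st := array.reverse.foldl amStep ([], [])
  st.1.reverse

-- ===== PRECONDITION & SPEC =====
def Spec_array_manip (array : List Int) (out : List Int) : Prop := out = array_manip_alt array
instance (array : List Int) (out : List Int) : Decidable (Spec_array_manip array out) := by unfold Spec_array_manip; infer_instance

-- ===== CLAIM (what is proved, stated in full; the proofs are below) =====
def Claim_equal_array_manip : Prop := ∀ (array : List Int), Dom_array_manip array → Spec_array_manip array (array_manip array)

-- ===== LEMMAS AND PROOFS =====

-- the common mathematical value: per element, min of the later elements greater
-- than it (default -1)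
def amMingt (x : Int) (t : List Int) : Int :=
  PySem.List.minD (t.filter (fun a => decide (x < a))) (fun y => y) (-1)

def amSpecFn : List Int → List Int
  | [] => []
  | x :: t => amMingt x t :: amSpecFn t

-- ---- generic facts about minD ----
theorem amMinD_sorted_cons (y : Int) (ys : List Int)
    (h : List.Pairwise (· ≤ ·) (y :: ys)) :
    PySem.List.minD (y :: ys) (fun v => v) (-1) = y := by
  have hm := PySem.List.min?_id_cons y ys
  have hmem := PySem.List.min?_mem (xs := y :: ys) (key := fun v => v) hm
  have hmin := PySem.List.min?_isMin (xs := y :: ys) (key := fun v => v) hm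
  have h1 : y ≤ ys.foldl min y := by
    rcases List.mem_cons.1 hmem with h' | h'
    · exact le_of_eq h'.symm
    · exact List.rel_of_pairwise_cons h h'
  have h2 : ys.foldl min y ≤ y := hmin y (List.mem_cons_self ..)
  have h3 : ys.foldl min y = y := le_antisymm h2 h1
  simp [PySem.List.minD, hm, h3]

theorem amMinD_perm (l l' : List Int) (hp : l.Perm l') :
    PySem.List.minD l (fun v => v) (-1) = PySem.List.minD l' (fun v => v) (-1) := by
  rcases hl : PySem.List.min? l (fun v => v) with _ | m
  · have h0 : l = [] := (PySem.List.min?_eq_none_iff _ _).1 hl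
    subst h0
    have h0' : l' = [] := hp.symm.eq_nil
    simp [h0', PySem.List.minD]
  · rcases hl' : PySem.List.min? l' (fun v => v) with _ | m'
    · have h0 : l' = [] := (PySem.List.min?_eq_none_iff _ _).1 hl'
      subst h0
      have h0' : l = [] := hp.eq_nil
      subst h0'
      simp [PySem.List.min?] at hl
    · have hm := PySem.List.min?_mem (key := fun v => v) hl
      have hm' := PySem.List.min?_mem (key := fun v => v) hl'
      have h1 : m ≤ m' := PySem.List.min?_isMin (key := fun v => v) hl m' (hp.symm.subset hm')
      have h2 : m' ≤ m := PySem.List.min?_isMin (key := fun v => v) hl' m (hp.subset hm)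
      simp [PySem.List.minD, hl, hl', le_antisymm h1 h2]

theorem amMingt_perm (x : Int) (s t : List Int) (hp : s.Perm t) :
    amMingt x s = amMingt x t :=
  amMinD_perm _ _ (hp.filter _)

-- ---- A equals the spec function ----
theorem amA_inner (ai : Int) (l acc : List Int) :
    l.foldl (fun ml a => if a > ai then ml ++ [a] else ml) acc
      = acc ++ l.filter (fun a => decide (ai < a)) := by
  simpa using PySem.List.foldl_append_if (fun a => decide (ai < a)) id l acc

theorem amA_map (xs : List Int) :
    (List.range xs.length).map
        (fun k => amMingt (xs.getD k 0) (xs.drop (k + 1))) = amSpecFn xs := by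
  induction xs with
  | nil => simp [amSpecFn]
  | cons x t ih =>
    rw [List.length_cons, List.range_succ_eq_map, List.map_cons, List.map_map]
    have htail : List.map ((fun k => amMingt ((x :: t).getD k 0) (List.drop (k + 1) (x :: t))) ∘
        Nat.succ) (List.range t.length) = amSpecFn t := by
      rw [← ih]
      exact List.map_congr_left (fun k _ => by simp [Function.comp])
    rw [htail]
    simp [amSpecFn]

theorem amA_eq_spec (xs : List Int) : array_manip xs = amSpecFn xs := by
  unfold array_manip
  simp only [amA_inner, List.nil_append, PySem.List.foldl_append_singleton_eq_map,
    List.nil_append, PySem.List.pyRange_one, List.map_map]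
  rw [show ((xs.length : Int) - 0).toNat = xs.length by omega, ← amA_map xs]
  refine List.map_congr_left (fun k _ => ?_)
  simp only [Function.comp_apply, zero_add, PySem.List.pyGetD_natCast]
  rw [PySem.List.slice_from (xs := xs) (a := (k : Int) + 1) (by omega)]
  have h2 : ((k : Int) + 1).toNat = k + 1 := by omega
  rw [h2]
  simp [amMingt, List.getD]

-- ---- B equals the spec function ----
theorem amSorted_getD_mono (s : List Int) (hs : List.Pairwise (· ≤ ·) s)
    (i j : Nat) (hij : i ≤ j) (hj : j < s.length) :
    s.getD i 0 ≤ s.getD j 0 := by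
  rcases eq_or_lt_of_le hij with rfl | h
  · exact le_refl _
  · rw [List.getD_eq_getElem s 0 (lt_trans h hj), List.getD_eq_getElem s 0 hj]
    exact List.pairwise_iff_getElem.1 hs i j _ _ h

theorem amBsearch_bounds (s : List Int) (x : Int) (lo hi : Nat) (h : lo ≤ hi) :
    lo ≤ amBsearch s x lo hi ∧ amBsearch s x lo hi ≤ hi := by
  fun_induction amBsearch s x lo hi with
  | case1 lo hi _h mid hle ih => have := ih (by omega); omega
  | case2 lo hi _h mid hle ih => have := ih (by omega); omega
  | case3 lo hi _h => omega

theorem amBsearch_correct (s : List Int) (hs : List.Pairwise (· ≤ ·) s) (x : Int)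
    (lo hi : Nat) (hlohi : lo ≤ hi) (hhi : hi ≤ s.length)
    (hbelow : ∀ k, k < lo → s.getD k 0 ≤ x)
    (habove : ∀ k, hi ≤ k → k < s.length → x < s.getD k 0) :
    (∀ k, k < amBsearch s x lo hi → s.getD k 0 ≤ x) ∧
    (∀ k, amBsearch s x lo hi ≤ k → k < s.length → x < s.getD k 0) := by
  fun_induction amBsearch s x lo hi with
  | case1 lo hi _h mid hle ih =>
    refine ih (by omega) hhi (fun k hk => ?_) habove
    exact le_trans (amSorted_getD_mono s hs k mid (by omega) (by omega)) hle
  | case2 lo hi _h mid hgt ih =>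
    refine ih (by omega) (by omega) hbelow (fun k hk hk' => ?_)
    exact lt_of_lt_of_le (lt_of_not_ge hgt) (amSorted_getD_mono s hs mid k hk hk')
  | case3 lo hi _h =>
    exact ⟨fun k hk => hbelow k hk, fun k hk hk' => habove k (by omega) hk'⟩

theorem amMem_take (s : List Int) (j : Nat) (x : Int)
    (hb : ∀ k, k < j → s.getD k 0 ≤ x) : ∀ a ∈ s.take j, a ≤ x := by
  intro a ha
  obtain ⟨i, hi, rfl⟩ := List.mem_take_iff_getElem.1 ha
  have := hb i (by omega)
  rwa [List.getD_eq_getElem s 0 (by omega)] at this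

theorem amMem_drop (s : List Int) (j : Nat) (x : Int)
    (ha : ∀ k, j ≤ k → k < s.length → x < s.getD k 0) : ∀ a ∈ s.drop j, x < a := by
  intro a hmem
  obtain ⟨i, hi, rfl⟩ := List.mem_iff_getElem.1 hmem
  rw [List.getElem_drop]
  have hlen : j + i < s.length := by
    have := s.length_drop (i := j); omega
  have := ha (j + i) (by omega) hlen
  rwa [List.getD_eq_getElem s 0 hlen] at this

-- filter of a sorted list splits at the bisection point
theorem amFilter_eq_drop (s : List Int) (x : Int) (j : Nat)
    (hbelow : ∀ k, k < j → s.getD k 0 ≤ x)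
    (habove : ∀ k, j ≤ k → k < s.length → x < s.getD k 0) :
    s.filter (fun a => decide (x < a)) = s.drop j := by
  conv_lhs => rw [← List.take_append_drop j s]
  rw [List.filter_append]
  have h1 : (s.take j).filter (fun a => decide (x < a)) = [] :=
    List.filter_eq_nil_iff.2 (fun a ha => by
      simpa using not_lt.2 (amMem_take s j x hbelow a ha))
  have h2 : (s.drop j).filter (fun a => decide (x < a)) = s.drop j :=
    List.filter_eq_self.2 (fun a ha => by
      simpa using amMem_drop s j x habove a ha)
  rw [h1, h2, List.nil_append]

theorem amStep_spec (t : List Int) :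
    ∃ s : List Int, t.reverse.foldl amStep ([], []) = ((amSpecFn t).reverse, s)
      ∧ s.Perm t ∧ List.Pairwise (· ≤ ·) s := by
  induction t with
  | nil => exact ⟨[], by simp [amSpecFn], List.Perm.refl _, List.Pairwise.nil⟩
  | cons x t ih =>
    obtain ⟨s, hf, hperm, hsort⟩ := ih
    rw [List.reverse_cons, List.foldl_concat, hf]
    have hlb := amBsearch_bounds s x 0 s.length (Nat.zero_le _)
    set j := amBsearch s x 0 s.length with hj
    obtain ⟨hb, ha⟩ := amBsearch_correct s hsort x 0 s.length (Nat.zero_le _)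
      (le_refl _) (fun k hk => absurd hk (Nat.not_lt_zero k)) (fun k hk hk' => absurd hk' (by omega))
    have hfd : s.filter (fun a => decide (x < a)) = s.drop j :=
      amFilter_eq_drop s x j hb ha
    -- the answer produced this step is amMingt x t
    have hnxt : (if j < s.length then s.getD j 0 else -1) = amMingt x t := by
      rw [← amMingt_perm x s t hperm]
      unfold amMingt
      rw [hfd]
      by_cases hcase : j < s.length
      · rw [if_pos hcase, List.drop_eq_getElem_cons hcase,
          amMinD_sorted_cons _ _ (by rw [← List.drop_eq_getElem_cons hcase]; exact hsort.drop),
          List.getD_eq_getElem s 0 hcase]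
      · rw [if_neg hcase, List.drop_eq_nil_of_le (by omega)]
        rfl
    have hins : PySem.List.insert s (j : Int) x = s.take j ++ x :: s.drop j :=
      PySem.List.insert_natCast s j x hlb.2
    refine ⟨PySem.List.insert s (j : Int) x, ?_, ?_, ?_⟩
    · show amStep ((amSpecFn t).reverse, s) x = _
      unfold amStep
      simp only [← hj]
      show ((amSpecFn t).reverse ++ [if j < s.length then s.getD j 0 else -1],
        PySem.List.insert s (j : Int) x) = _
      rw [hnxt]
      show _ = ((amMingt x t :: amSpecFn t).reverse, PySem.List.insert s (j : Int) x)
      rw [List.reverse_cons]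
    · rw [hins]
      exact (List.perm_middle).trans ((List.take_append_drop j s ▸ hperm).cons x)
    · rw [hins, List.pairwise_append]
      refine ⟨hsort.take, List.Pairwise.cons (fun b hbmem => ?_) hsort.drop, ?_⟩
      · exact le_of_lt (amMem_drop s j x ha b hbmem)
      · intro a hamem b hbmem
        have hax : a ≤ x := amMem_take s j x hb a hamem
        rcases List.mem_cons.1 hbmem with rfl | hbmem'
        · exact hax
        · exact le_trans hax (le_of_lt (amMem_drop s j x ha b hbmem'))

theorem amB_eq_spec (xs : List Int) : array_manip_alt xs = amSpecFn xs := by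
  obtain ⟨s, hfold, -, -⟩ := amStep_spec xs
  simp [array_manip_alt, hfold]

-- ===== VERDICT (by name: the statement is the Claim_ definition above) =====
theorem array_manip_spec : Claim_equal_array_manip := by
  intro array _
  unfold Spec_array_manip
  rw [amA_eq_spec, amB_eq_spec]
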